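-- pv_equiv track=rewrite | github.com/EPOCH-X/AgentShield | backend/core/target_adapter.py | _latest_message_content
-- ===== SOURCE A (Python) =====
-- def _latest_message_content(messages: list[dict[str, str]]) -> str:
--     for item in reversed(messages):
--         if not isinstance(item, dict):
--             continue
--         content = str(item.get("content") or "").strip()
--         if content:
--             return content
--     return ""
-- ===== SOURCE B (Python) =====
-- def _latest_message_content(messages: list[dict[str, str]]) -> str:
--     result = ""
--     for item in messages:
--         if not isinstance(item, dict):
--             continue
--         content = str(item.get("content") or "").strip()
--         if content:
--             result = content
--     return result
-- ===== Notes on version B (the rewrite author's own statement) =====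
-- stated objective: alternative
-- what changed: B scans messages forward with an overwrite accumulator instead of A's reversed scan with early return; the last non-empty stripped content wins either way.
import Mathlib
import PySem

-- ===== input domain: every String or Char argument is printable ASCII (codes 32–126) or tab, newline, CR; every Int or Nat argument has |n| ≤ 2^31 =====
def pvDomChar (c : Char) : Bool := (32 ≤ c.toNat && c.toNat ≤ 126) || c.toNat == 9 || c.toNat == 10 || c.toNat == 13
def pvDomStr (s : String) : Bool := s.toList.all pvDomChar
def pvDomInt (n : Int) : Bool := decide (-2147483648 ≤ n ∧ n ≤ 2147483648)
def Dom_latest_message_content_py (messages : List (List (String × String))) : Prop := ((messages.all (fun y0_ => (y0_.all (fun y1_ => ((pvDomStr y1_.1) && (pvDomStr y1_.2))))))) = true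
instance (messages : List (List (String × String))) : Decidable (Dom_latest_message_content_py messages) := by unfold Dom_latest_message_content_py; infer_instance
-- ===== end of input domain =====

-- B scans forward with an overwrite accumulator instead of A's reversed scan with early return.

-- ===== PORT A =====
-- content = str(item.get("content") or "").strip()  — get? + `or ""` collapses none and "" to "", str() is identity on str
def pvContentA (item : List (String × String)) : String :=
  PySem.Str.strip ((((PySem.Dict.mk item).get? "content").getD ""))

-- the `for item in reversed(messages)` loop with its early return
def pvLoopA : List (List (String × String)) → String
  | [] => ""
  | item :: rest =>
      let content := pvContentA item
      if content ≠ "" then content else pvLoopA rest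

def latest_message_content_py (messages : List (List (String × String))) : String :=
  pvLoopA messages.reverse

-- ===== PORT B =====
def pvStepB (result : String) (item : List (String × String)) : String :=
  let content := PySem.Str.strip ((((PySem.Dict.mk item).get? "content").getD ""))
  if content ≠ "" then content else result

def latest_message_content_py_alt (messages : List (List (String × String))) : String :=
  messages.foldl pvStepB ""

-- ===== PRECONDITION & SPEC =====
def Spec_latest_message_content_py (messages : List (List (String × String))) (out : String) : Prop := out = latest_message_content_py_alt messages
instance (messages : List (List (String × String))) (out : String) : Decidable (Spec_latest_message_content_py messages out) := by unfold Spec_latest_message_content_py; infer_instance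

-- ===== CLAIM (what is proved, stated in full; the proofs are below) =====
def Claim_equal_latest_message_content_py : Prop := ∀ (messages : List (List (String × String))), Dom_latest_message_content_py messages → Spec_latest_message_content_py messages (latest_message_content_py messages)

-- ===== LEMMAS AND PROOFS =====

theorem pvLoopA_append (a b : List (List (String × String))) :
    pvLoopA (a ++ b) = if pvLoopA a ≠ "" then pvLoopA a else pvLoopA b := by
  induction a with
  | nil => simp [pvLoopA]
  | cons x t ih =>
      simp only [List.cons_append, pvLoopA, ih]
      by_cases h : pvContentA x ≠ "" <;> simp [h]

theorem foldl_eq_loopA (l : List (List (String × String))) (acc : String) :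
    l.foldl pvStepB acc = if pvLoopA l.reverse ≠ "" then pvLoopA l.reverse else acc := by
  induction l generalizing acc with
  | nil => simp [pvLoopA]
  | cons x t ih =>
      simp only [List.foldl_cons, ih, List.reverse_cons, pvLoopA_append]
      by_cases h : pvLoopA t.reverse ≠ ""
      · simp [h]
      · simp only [not_not] at h
        simp only [h, ite_not, pvLoopA, pvStepB, pvContentA]
        split_ifs <;> simp_all

-- ===== VERDICT (by name: the statement is the Claim_ definition above) =====
theorem latest_message_content_py_spec : Claim_equal_latest_message_content_py := by
  intro messages _
  unfold Spec_latest_message_content_py latest_message_content_py latest_message_content_py_alt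
  rw [foldl_eq_loopA]
  by_cases h : pvLoopA messages.reverse = "" <;> simp [h]
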